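-- pv_equiv track=rewrite | github.com/wlzshmily/commodity-option-data-manager | src/option_data_manager/webui/app.py | _aggregate_contract_months
-- ===== SOURCE A (Python) =====
-- def _aggregate_contract_months(rows: list[dict]) -> str | None:
--     values = {
--         str(row.get("contract_months")).strip().lower()
--         for row in rows
--         if row.get("contract_months") is not None
--     }
--     if not values:
--         return None
--     if "all" in values:
--         return "all"
--     parsed = sorted(_int_value(value) for value in values if _int_value(value) > 0)
--     return str(parsed[-1]) if parsed else None
--
-- def _int_value(value: object, default: int = 0) -> int:
--     try:
--         return int(value)
--     except (TypeError, ValueError):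
--         return default
-- ===== SOURCE B (Python) =====
-- def _aggregate_contract_months(rows: list[dict]) -> str | None:
--     has_all = False
--     best = None
--     for row in rows:
--         raw = row.get("contract_months")
--         if raw is None:
--             continue
--         text = str(raw).strip().lower()
--         if text == "all":
--             has_all = True
--         else:
--             n = _int_value(text)
--             if n > 0:
--                 best = n if best is None else max(best, n)
--     if has_all:
--         return "all"
--     return str(best) if best is not None else None
--
-- def _int_value(value: object, default: int = 0) -> int:
--     try:
--         return int(value)
--     except (TypeError, ValueError):
--         return default
-- ===== Notes on version B (the rewrite author's own statement) =====
-- stated objective: alternative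
-- what changed: Replaced A's build-a-dedup-set then membership-test then filter+sort+take-last pipeline with a single scan over the rows that maintains a has_all flag and the running maximum positive parsed value.
import Mathlib
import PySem

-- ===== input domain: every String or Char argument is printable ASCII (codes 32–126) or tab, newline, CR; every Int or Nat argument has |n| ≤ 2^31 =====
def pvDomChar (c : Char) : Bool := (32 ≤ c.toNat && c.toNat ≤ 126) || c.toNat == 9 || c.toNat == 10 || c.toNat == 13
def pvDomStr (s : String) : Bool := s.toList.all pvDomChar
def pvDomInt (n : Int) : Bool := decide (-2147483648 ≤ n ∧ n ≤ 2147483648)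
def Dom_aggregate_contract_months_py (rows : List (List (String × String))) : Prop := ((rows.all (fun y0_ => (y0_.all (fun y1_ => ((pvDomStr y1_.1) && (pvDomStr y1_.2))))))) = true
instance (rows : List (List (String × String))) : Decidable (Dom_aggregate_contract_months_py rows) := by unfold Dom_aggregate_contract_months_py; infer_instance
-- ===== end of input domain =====

-- ===== PORT A =====
-- B changes the decomposition: one scan with running has_all/max state instead of A's set-building + membership + sort pipeline (objective: alternative).
-- shared module helper _int_value (int(value) with 0 on ValueError)
def pvIntValue (s : String) : Int := (PySem.Int.ofStr? s).getD 0

-- str(row.get("contract_months")).strip().lower() for the rows where the key is present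
def pvNormA (row : List (String × String)) : Option String :=
  (PySem.Dict.get? (⟨row⟩ : PySem.Dict String String) "contract_months").map (fun v => PySem.Str.lower (PySem.Str.strip v))

def aggregate_contract_months_py (rows : List (List (String × String))) : Option String :=
  let values : PySem.Set String := PySem.Set.ofList (rows.filterMap pvNormA)
  if values = [] then none
  else if PySem.Set.contains values "all" then some "all"
  else
    let parsed : List Int :=
      PySem.List.sorted ((values.filter (fun v => decide (0 < pvIntValue v))).map pvIntValue)
        (fun x => x) false
    match PySem.List.pyGet? parsed (-1) with
    | some m => some (PySem.Int.toStr m)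
    | none => none

-- ===== PORT B =====
def aggregate_contract_months_py_alt (rows : List (List (String × String))) : Option String :=
  let st : Bool × Option Int :=
    rows.foldl (fun st row =>
      match PySem.Dict.get? (⟨row⟩ : PySem.Dict String String) "contract_months" with
      | none => st
      | some raw =>
        let text := PySem.Str.lower (PySem.Str.strip raw)
        if text = "all" then (true, st.2)
        else
          let n := pvIntValue text
          if 0 < n then
            (st.1, some (match st.2 with | none => n | some b => max b n))
          else st) (false, none)
  if st.1 then some "all"
  else
    match st.2 with
    | some b => some (PySem.Int.toStr b)
    | none => none

-- ===== PRECONDITION & SPEC =====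
def Spec_aggregate_contract_months_py (rows : List (List (String × String))) (out : Option String) : Prop := out = aggregate_contract_months_py_alt rows
instance (rows : List (List (String × String))) (out : Option String) : Decidable (Spec_aggregate_contract_months_py rows out) := by unfold Spec_aggregate_contract_months_py; infer_instance

-- ===== CLAIM (what is proved, stated in full; the proofs are below) =====
def Claim_equal_aggregate_contract_months_py : Prop := ∀ (rows : List (List (String × String))), Dom_aggregate_contract_months_py rows → Spec_aggregate_contract_months_py rows (aggregate_contract_months_py rows)

-- ===== LEMMAS AND PROOFS =====

-- the normalized values, in row order
def pvNorms (rows : List (List (String × String))) : List String := rows.filterMap pvNormA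

-- the positive parsed values of a list of normalized strings
def pvPosInts (l : List String) : List Int :=
  (l.filter (fun v => decide (0 < pvIntValue v))).map pvIntValue

def pvStep2 (acc : Option Int) (s : String) : Option Int :=
  if 0 < pvIntValue s then
    some (match acc with | none => pvIntValue s | some b => max b (pvIntValue s))
  else acc

theorem pvIntValue_all : pvIntValue "all" = 0 := by decide

-- B's fold over rows = a fold over the normalized values
theorem bfold_norms (rows : List (List (String × String))) (st : Bool × Option Int) :
    rows.foldl (fun st row =>
      match PySem.Dict.get? (⟨row⟩ : PySem.Dict String String) "contract_months" with
      | none => st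
      | some raw =>
        let text := PySem.Str.lower (PySem.Str.strip raw)
        if text = "all" then (true, st.2)
        else
          let n := pvIntValue text
          if 0 < n then
            (st.1, some (match st.2 with | none => n | some b => max b n))
          else st) st
    = (pvNorms rows).foldl (fun st text =>
        if text = "all" then (true, st.2)
        else if 0 < pvIntValue text then
          (st.1, some (match st.2 with | none => pvIntValue text | some b => max b (pvIntValue text)))
        else st) st := by
  rw [pvNorms, List.foldl_filterMap]
  induction rows generalizing st with
  | nil => rfl
  | cons r t ih =>
    simp only [List.foldl_cons]
    rw [← ih]
    congr 1
    unfold pvNormA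
    cases PySem.Dict.get? (⟨r⟩ : PySem.Dict String String) "contract_months" <;> rfl

-- the fold over normalized values splits into its two independent components
theorem bfold_split (l : List String) (b : Bool) (acc : Option Int) :
    l.foldl (fun st text =>
        if text = "all" then (true, st.2)
        else if 0 < pvIntValue text then
          (st.1, some (match st.2 with | none => pvIntValue text | some b => max b (pvIntValue text)))
        else st) (b, acc)
    = (b || l.any (fun s => s = "all"), l.foldl pvStep2 acc) := by
  induction l generalizing b acc with
  | nil => simp
  | cons s t ih =>
    by_cases hs : s = "all"
    · subst hs
      simp [ih, pvStep2, pvIntValue_all]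
    · simp only [List.foldl_cons, List.any_cons, if_neg hs]
      by_cases hp : 0 < pvIntValue s
      · simp [hp, ih, pvStep2, hs]
      · simp [hp, ih, pvStep2, hs]

-- the pvStep2 fold is the running max of the positive parsed values
theorem step2_posInts (l : List String) (acc : Option Int) :
    l.foldl pvStep2 acc
    = (pvPosInts l).foldl (fun acc n => some (match acc with | none => n | some b => max b n)) acc := by
  induction l generalizing acc with
  | nil => rfl
  | cons s t ih =>
    by_cases hp : 0 < pvIntValue s
    · simp [pvPosInts, hp, pvStep2, ih]
    · simp [pvPosInts, hp, pvStep2, ih]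

-- the running max over Int is List.max?
theorem omax_eq_max?_aux (xs : List Int) (b : Int) :
    xs.foldl (fun acc n => some (match acc with | none => n | some b => max b n)) (some b)
    = some (xs.foldl max b) := by
  induction xs generalizing b with
  | nil => rfl
  | cons x t ih => simp [ih]

theorem omax_eq_max? (xs : List Int) :
    xs.foldl (fun acc n => some (match acc with | none => n | some b => max b n)) none = xs.max? := by
  cases xs with
  | nil => rfl
  | cons x t =>
    rw [List.max?_cons', List.foldl_cons]
    exact omax_eq_max?_aux t x

-- the last element of a ≤-pairwise list bounds every element
theorem pairwise_le_getLast? (l : List Int) (m : Int)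
    (hp : l.Pairwise (· ≤ ·)) (hl : l.getLast? = some m) : ∀ y ∈ l, y ≤ m := by
  induction l with
  | nil => simp at hl
  | cons a t ih =>
    rcases List.pairwise_cons.mp hp with ⟨ha, ht⟩
    cases t with
    | nil =>
      simp at hl
      subst hl
      simp
    | cons c u =>
      rw [List.getLast?_cons_cons] at hl
      intro y hy
      rcases List.mem_cons.mp hy with rfl | hyt
      · exact le_trans (ha m (List.mem_of_getLast? hl)) le_rfl
      · exact ih ht hl y hyt

-- last of sorted = max?
theorem getLast?_sorted_eq_max? (xs : List Int) :
    (PySem.List.sorted xs (fun x => x) false).getLast? = xs.max? := by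
  by_cases hx : xs = []
  · subst hx
    rfl
  · have hs : PySem.List.sorted xs (fun x => x) false ≠ [] := by
      simpa [PySem.List.sorted_eq_nil_iff] using hx
    obtain ⟨m, hm⟩ : ∃ m, (PySem.List.sorted xs (fun x => x) false).getLast? = some m := by
      cases h : (PySem.List.sorted xs (fun x => x) false).getLast? with
      | none => exact absurd (List.getLast?_eq_none_iff.mp h) hs
      | some m => exact ⟨m, rfl⟩
    rw [hm]
    have hperm := PySem.List.sorted_perm xs (fun x => x) false
    have hpw := PySem.List.sorted_pairwise xs (fun x => x)
    symm
    rw [List.max?_eq_some_iff]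
    constructor
    · exact hperm.mem_iff.mp (List.mem_of_getLast? hm)
    · intro y hy
      exact pairwise_le_getLast? _ m (by simpa using hpw) hm y (hperm.mem_iff.mpr hy)

-- max? only depends on membership
theorem max?_congr_mem (l₁ l₂ : List Int) (h : ∀ x, x ∈ l₁ ↔ x ∈ l₂) : l₁.max? = l₂.max? := by
  cases h1 : l₁.max? with
  | none =>
    rw [List.max?_eq_none_iff] at h1
    subst h1
    symm
    rw [List.max?_eq_none_iff, List.eq_nil_iff_forall_not_mem]
    intro x hx
    exact (by simpa using (h x).mpr hx)
  | some m =>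
    rw [List.max?_eq_some_iff] at h1
    symm
    rw [List.max?_eq_some_iff]
    exact ⟨(h m).mp h1.1, fun b hb => h1.2 b ((h b).mpr hb)⟩

theorem mem_posInts_ofList (l : List String) (x : Int) :
    x ∈ pvPosInts (PySem.Set.ofList l) ↔ x ∈ pvPosInts l := by
  simp [pvPosInts, List.mem_filter, PySem.Set.mem_ofList]

theorem ofList_eq_nil_iff (l : List String) : PySem.Set.ofList l = ([] : List String) ↔ l = [] := by
  constructor
  · intro h
    rw [List.eq_nil_iff_forall_not_mem]
    intro x hx
    have := (PySem.Set.mem_ofList l x).mpr hx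
    simp [h] at this
  · intro h; subst h; rfl

-- ===== VERDICT (by name: the statement is the Claim_ definition above) =====
theorem contains_ofList_all (l : List String) :
    PySem.Set.contains (PySem.Set.ofList l) "all" = decide ("all" ∈ l) := by
  simp [PySem.Set.contains, PySem.Set.mem_ofList]

theorem aggregate_contract_months_py_spec : Claim_equal_aggregate_contract_months_py := by
  intro rows _
  unfold Spec_aggregate_contract_months_py aggregate_contract_months_py aggregate_contract_months_py_alt
  rw [bfold_norms, bfold_split, step2_posInts]
  have hE : List.filterMap pvNormA rows = pvNorms rows := rfl
  have hP : ∀ l : List String,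
      List.map pvIntValue (List.filter (fun v => decide (0 < pvIntValue v)) l) = pvPosInts l :=
    fun _ => rfl
  rw [hE]
  dsimp only
  rw [contains_ofList_all, hP]
  by_cases hall : "all" ∈ pvNorms rows
  · have hvne : PySem.Set.ofList (pvNorms rows) ≠ [] := by
      intro h
      rw [ofList_eq_nil_iff] at h
      simp [h] at hall
    have hany : ((pvNorms rows).any fun s => decide (s = "all")) = true :=
      List.any_eq_true.mpr ⟨"all", hall, by simp⟩
    simp [hvne, hall, hany]
  · have hany : ((pvNorms rows).any fun s => decide (s = "all")) = false := by
      simp only [List.any_eq_false, decide_eq_true_eq]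
      intro s hs h
      exact hall (h ▸ hs)
    by_cases hnil : pvNorms rows = []
    · rw [hnil]
      rfl
    · have hvne : PySem.Set.ofList (pvNorms rows) ≠ [] := by
        intro h
        exact hnil ((ofList_eq_nil_iff _).mp h)
      rw [if_neg hvne]
      simp only [hall, decide_false, Bool.false_eq_true, if_false, hany, Bool.false_or]
      rw [omax_eq_max?, PySem.List.pyGet?_neg_one, getLast?_sorted_eq_max?,
          max?_congr_mem _ _ (mem_posInts_ofList (pvNorms rows))]
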